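-- pv_equiv track=rewrite | github.com/pypi-data/pypi-mirror-397 | packages/bt-ddos-shield-client/bt_ddos_shield_client-0.3.4-py3-none-any.whl/bt_ddos_shield/utils.py | extract_commitment_url
-- ===== SOURCE A (Python) =====
-- COMMITMENT_PREFIX = '<D:'
--
-- COMMITMENT_SUFFIX = '>'
--
-- LEGACY_COMMITMENT_PREFIXES = ('http://', 'https://')
--
-- def extract_commitment_url(commitment: str | None) -> tuple[str | None, str, bool]:
--     """
--     Extract Shield URL and remaining commitment data.
--
--     Returns:
--         tuple:
--             - extracted URL or None if not present,
--             - remaining commitment string (without Shield envelope),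
--             - bool flag indicating if legacy plain URL format was detected.
--     """
--     if not commitment:
--         return None, '', False
--
--     envelope_start = commitment.find(COMMITMENT_PREFIX)
--     if envelope_start != -1:
--         envelope_end = commitment.find(COMMITMENT_SUFFIX, envelope_start + len(COMMITMENT_PREFIX))
--         if envelope_end != -1:
--             url = commitment[envelope_start + len(COMMITMENT_PREFIX) : envelope_end]
--             rest = commitment[:envelope_start] + commitment[envelope_end + len(COMMITMENT_SUFFIX) :]
--             return url, rest, False
--
--     for prefix in LEGACY_COMMITMENT_PREFIXES:
--         if commitment.startswith(prefix):
--             delimiter_pos = commitment.find('<', len(prefix))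
--             if delimiter_pos == -1:
--                 return commitment, '', True
--             return commitment[:delimiter_pos], commitment[delimiter_pos:], True
--
--     return None, commitment, False
-- ===== SOURCE B (Python) =====
-- import re
--
-- _ENVELOPE_RE = re.compile(r'<D:(.*?)>', re.DOTALL)
-- _LEGACY_RE = re.compile(r'(https?://[^<]*)(.*)', re.DOTALL)
--
--
-- def extract_commitment_url(commitment):
--     if commitment is None:
--         return None, '', False
--     m = _ENVELOPE_RE.search(commitment)
--     if m:
--         return m.group(1), commitment[:m.start()] + commitment[m.end():], False
--     m = _LEGACY_RE.match(commitment)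
--     if m:
--         return m.group(1), m.group(2), True
--     return None, commitment, False
-- ===== Notes on version B (the rewrite author's own statement) =====
-- stated objective: idiomatic
-- what changed: A locates the envelope and legacy delimiter with find/find-with-start index arithmetic and hand-spliced slices; B matches two compiled regular expressions (a non-greedy DOTALL search for <D:(.*?)> and an anchored (https?://[^<]*)(.*) match) and reads the answer off the capture groups, ported in Lean as a backtracking leftmost match with lazy capture and takeWhile/dropWhile.
import Mathlib
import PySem

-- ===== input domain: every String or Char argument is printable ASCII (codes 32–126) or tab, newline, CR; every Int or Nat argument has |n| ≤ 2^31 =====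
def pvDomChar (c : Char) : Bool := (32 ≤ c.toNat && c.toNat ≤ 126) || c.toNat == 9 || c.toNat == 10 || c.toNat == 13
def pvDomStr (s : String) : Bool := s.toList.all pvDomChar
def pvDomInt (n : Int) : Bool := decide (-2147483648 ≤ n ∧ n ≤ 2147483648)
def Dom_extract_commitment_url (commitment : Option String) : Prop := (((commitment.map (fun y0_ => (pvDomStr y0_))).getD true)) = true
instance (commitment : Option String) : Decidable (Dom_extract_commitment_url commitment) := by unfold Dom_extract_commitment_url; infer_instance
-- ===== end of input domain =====

-- B replaces A's find/index-arithmetic extraction by two regular-expression matches; objective: idiomatic (not faster).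

-- ===== PORT A =====
-- A, on the code-point list; the legacy-prefix for loop is the structural recursion legacyA over the prefix tuple.
def legacyA (cs : List Char) : List (List Char) → Option (List Char) × List Char × Bool
  | [] => (none, cs, false)
  | p :: ps =>
    if PySem.Chars.startswith cs p then
      let d := PySem.Chars.findFrom cs ['<'] (p.length : Int) none
      if d = -1 then (some cs, [], true)
      else (some (PySem.Chars.slice cs none (some d)), PySem.Chars.slice cs (some d) none, true)
    else legacyA cs ps

def extractA (cs : List Char) : Option (List Char) × List Char × Bool :=
  let es := PySem.Chars.find cs ['<', 'D', ':']
  if es ≠ -1 then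
    let ee := PySem.Chars.findFrom cs ['>'] (es + 3) none
    if ee ≠ -1 then
      (some (PySem.Chars.slice cs (some (es + 3)) (some ee)),
       PySem.Chars.slice cs none (some es) ++ PySem.Chars.slice cs (some (ee + 1)) none,
       false)
    else legacyA cs [['h','t','t','p',':','/','/'], ['h','t','t','p','s',':','/','/']]
  else legacyA cs [['h','t','t','p',':','/','/'], ['h','t','t','p','s',':','/','/']]

def extract_commitment_url (commitment : Option String) : Option String × String × Bool :=
  match commitment with
  | none => (none, "", false)
  | some c =>
    if c.toList = [] then (none, "", false)
    else
      let r := extractA c.toList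
      (r.1.map String.ofList, String.ofList r.2.1, r.2.2)

-- ===== PORT B =====
-- Hand port of the regex engine's behaviour on the two FIXED patterns of Source B (no regex
-- primitive in PySem); exact for these patterns:
-- lazyCapture = the non-greedy '(.*?)>' with DOTALL: at each char first try to close with '>',
-- else consume the char into the capture.
def lazyCapture : List Char → Option (List Char × List Char)
  | [] => none
  | c :: t =>
    if c = '>' then some ([], t)
    else (lazyCapture t).map (fun r => (c :: r.1, r.2))

-- re.search(r'<D:(.*?)>', s, DOTALL): leftmost start position at which '<D:' then lazy capture
-- then '>' matches; returns (text before match, group 1, text after match).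
def searchEnv : List Char → Option (List Char × List Char × List Char)
  | [] => none
  | c :: t =>
    if (['<','D',':'] : List Char).isPrefixOf (c :: t) then
      match lazyCapture ((c :: t).drop 3) with
      | some r => some ([], r.1, r.2)
      | none => (searchEnv t).map (fun r => (c :: r.1, r.2.1, r.2.2))
    else (searchEnv t).map (fun r => (c :: r.1, r.2.1, r.2.2))

-- re.match(r'(https?://[^<]*)(.*)', s, DOTALL): 'https?' greedy (try with 's' first), then
-- '[^<]*' greedy = takeWhile (· != '<'); returns (group 1, group 2).
def legacyMatch (cs : List Char) : Option (List Char × List Char) :=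
  let p? : Option (List Char) :=
    if (['h','t','t','p','s',':','/','/'] : List Char).isPrefixOf cs then
      some ['h','t','t','p','s',':','/','/']
    else if (['h','t','t','p',':','/','/'] : List Char).isPrefixOf cs then
      some ['h','t','t','p',':','/','/']
    else none
  p?.map (fun p =>
    let rest := cs.drop p.length
    (p ++ rest.takeWhile (· != '<'), rest.dropWhile (· != '<')))

def extractB (cs : List Char) : Option (List Char) × List Char × Bool :=
  match searchEnv cs with
  | some r => (some r.2.1, r.1 ++ r.2.2, false)
  | none =>
    match legacyMatch cs with
    | some m => (some m.1, m.2, true)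
    | none => (none, cs, false)

def extract_commitment_url_alt (commitment : Option String) : Option String × String × Bool :=
  match commitment with
  | none => (none, "", false)
  | some c =>
    let r := extractB c.toList
    (r.1.map String.ofList, String.ofList r.2.1, r.2.2)

-- ===== PRECONDITION & SPEC =====
def Spec_extract_commitment_url (commitment : Option String) (out : Option String × String × Bool) : Prop := out = extract_commitment_url_alt commitment
instance (commitment : Option String) (out : Option String × String × Bool) : Decidable (Spec_extract_commitment_url commitment out) := by unfold Spec_extract_commitment_url; infer_instance

-- ===== CLAIM (what is proved, stated in full; the proofs are below) =====
def Claim_equal_extract_commitment_url : Prop := ∀ (commitment : Option String), Dom_extract_commitment_url commitment → Spec_extract_commitment_url commitment (extract_commitment_url commitment)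

-- ===== LEMMAS AND PROOFS =====

-- find points at i when i is an occurrence and no earlier index is
lemma find_eq_of (cs sub : List Char) (i : Nat)
    (h1 : sub <+: cs.drop i) (h2 : ∀ j < i, ¬ sub <+: cs.drop j) :
    PySem.Chars.find cs sub = (i : Int) := by
  have hin : PySem.Chars.isIn sub cs = true :=
    (PySem.Chars.exists_prefix_drop_iff_isIn sub cs).1 ⟨i, h1⟩
  have hinf : sub <:+: cs := (PySem.Chars.isIn_iff_infix sub cs).1 hin
  have hnn : 0 ≤ PySem.Chars.find cs sub := (PySem.Chars.find_nonneg_iff cs sub).2 hinf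
  obtain ⟨h3, h4⟩ := PySem.Chars.find_spec hnn
  have : (PySem.Chars.find cs sub).toNat = i := by
    rcases lt_trichotomy (PySem.Chars.find cs sub).toNat i with h | h | h
    · exact absurd h3 (h2 _ h)
    · exact h
    · exact absurd h1 (h4 _ h)
  omega

lemma find_zero (cs sub : List Char) (h : sub <+: cs) : PySem.Chars.find cs sub = 0 :=
  find_eq_of cs sub 0 (by simpa using h) (by omega)

lemma find_cons (c : Char) (t sub : List Char) (hp : ¬ sub <+: (c :: t)) :
    PySem.Chars.find (c :: t) sub =
      if PySem.Chars.find t sub = -1 then -1 else PySem.Chars.find t sub + 1 := by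
  by_cases hr : PySem.Chars.find t sub = -1
  · have hf : PySem.Chars.find (c :: t) sub = -1 := by
      rw [PySem.Chars.find_eq_neg_one_iff]
      intro hinf
      obtain ⟨j, hj⟩ := (PySem.Chars.exists_prefix_drop_iff_isIn sub (c :: t)).2
        ((PySem.Chars.isIn_iff_infix sub (c :: t)).2 hinf)
      match j with
      | 0 => exact hp (by simpa using hj)
      | j + 1 =>
        have : sub <+: t.drop j := by simpa using hj
        exact ((PySem.Chars.find_eq_neg_one_iff t sub).1 hr)
          ((PySem.Chars.isIn_iff_infix sub t).1
            ((PySem.Chars.exists_prefix_drop_iff_isIn sub t).1 ⟨j, this⟩))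
    simp [hf, hr]
  · have hnn : 0 ≤ PySem.Chars.find t sub := by
      have := PySem.Chars.neg_one_le_find t sub
      omega
    obtain ⟨h3, h4⟩ := PySem.Chars.find_spec hnn
    set i := (PySem.Chars.find t sub).toNat with hi
    have hf : PySem.Chars.find (c :: t) sub = ((i + 1 : Nat) : Int) := by
      apply find_eq_of
      · simpa using h3
      · intro j hj
        match j with
        | 0 => simpa using hp
        | j + 1 =>
          have : j < i := by omega
          simpa using h4 j this
    rw [hf]
    simp only [hr, if_false]
    omega

-- lazyCapture is the first-'>' split
lemma lazyCapture_eq (cs : List Char) :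
    lazyCapture cs =
      if PySem.Chars.find cs ['>'] = -1 then none
      else some (cs.take (PySem.Chars.find cs ['>']).toNat,
                 cs.drop ((PySem.Chars.find cs ['>']).toNat + 1)) := by
  induction cs with
  | nil =>
    have hf : PySem.Chars.find [] ['>'] = -1 := by
      rw [PySem.Chars.find_eq_neg_one_iff]
      intro h
      exact absurd (List.eq_nil_of_infix_nil h) (by simp)
    simp [lazyCapture, hf]
  | cons c t ih =>
    by_cases hc : c = '>'
    · subst hc
      have hf : PySem.Chars.find ('>' :: t) ['>'] = 0 := find_zero _ _ (by simp)
      simp [lazyCapture, hf]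
    · have hp : ¬ (['>'] : List Char) <+: (c :: t) := by
        intro h
        obtain ⟨u, hu⟩ := h
        exact hc (by simpa using congrArg (fun l => l.head?) hu.symm)
      rw [lazyCapture, if_neg hc, ih, find_cons c t ['>'] hp]
      by_cases hr : PySem.Chars.find t ['>'] = -1
      · simp [hr]
      · have hnn : 0 ≤ PySem.Chars.find t ['>'] := by
          have := PySem.Chars.neg_one_le_find t ['>']
          omega
        set i := (PySem.Chars.find t ['>']).toNat with hi
        have hfi : PySem.Chars.find t ['>'] = (i : Int) := by omega
        have h1 : ¬ ((i : Int) + 1 = -1) := by omega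
        have h2 : ((i : Int) + 1).toNat = i + 1 := by omega
        simp [hfi, h1, h2]

-- if no '>' occurs from index 3 on, the regex search fails everywhere
lemma searchEnv_none (cs : List Char) (h : ¬ (['>'] : List Char) <:+: cs.drop 3) :
    searchEnv cs = none := by
  induction cs with
  | nil => rfl
  | cons c t ih =>
    have h' : ¬ (['>'] : List Char) <:+: t.drop 2 := by
      simpa using h
    have ht : ¬ (['>'] : List Char) <:+: t.drop 3 := by
      intro hinf
      have hsuf : t.drop 3 <:+ t.drop 2 := by
        have := List.drop_suffix 1 (t.drop 2)
        simpa [List.drop_drop] using this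
      exact h' (hinf.trans hsuf.isInfix)
    rw [searchEnv]
    by_cases hp : (['<','D',':'] : List Char).isPrefixOf (c :: t)
    · have hf : PySem.Chars.find (t.drop 2) ['>'] = -1 :=
        (PySem.Chars.find_eq_neg_one_iff _ _).2 h'
      simp [hp, lazyCapture_eq, hf, ih ht]
    · simp [hp, ih ht]

-- the regex search is exactly A's first-'<D:'-then-first-'>' split
lemma searchEnv_spec (cs : List Char) :
    searchEnv cs =
      if PySem.Chars.find cs ['<','D',':'] = -1 then none
      else
        let i := (PySem.Chars.find cs ['<','D',':']).toNat
        let f := PySem.Chars.find (cs.drop (i + 3)) ['>']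
        if f = -1 then none
        else some (cs.take i, (cs.drop (i + 3)).take f.toNat,
                   (cs.drop (i + 3)).drop (f.toNat + 1)) := by
  induction cs with
  | nil =>
    have hf : PySem.Chars.find [] ['<','D',':'] = -1 := by
      rw [PySem.Chars.find_eq_neg_one_iff]
      intro h
      exact absurd (List.eq_nil_of_infix_nil h) (by simp)
    simp [searchEnv, hf]
  | cons c t ih =>
    by_cases hp : (['<','D',':'] : List Char) <+: (c :: t)
    · have hf : PySem.Chars.find (c :: t) ['<','D',':'] = 0 := find_zero _ _ hp
      rw [searchEnv, if_pos (List.isPrefixOf_iff_prefix.2 hp)]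
      by_cases hg : PySem.Chars.find (t.drop 2) ['>'] = -1
      · have hnone : searchEnv t = none := by
          apply searchEnv_none
          intro hinf
          have hsuf : t.drop 3 <:+ t.drop 2 := by
            have := List.drop_suffix 1 (t.drop 2)
            simpa [List.drop_drop] using this
          exact ((PySem.Chars.find_eq_neg_one_iff _ _).1 hg) (hinf.trans hsuf.isInfix)
        simp [hf, hg, lazyCapture_eq, hnone]
      · simp [hf, hg, lazyCapture_eq]
    · have hpf : ¬ (['<','D',':'] : List Char).isPrefixOf (c :: t) = true := by
        rw [List.isPrefixOf_iff_prefix]; exact hp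
      rw [searchEnv, if_neg hpf, ih, find_cons c t ['<','D',':'] hp]
      by_cases hr : PySem.Chars.find t ['<','D',':'] = -1
      · simp [hr]
      · have hnn : 0 ≤ PySem.Chars.find t ['<','D',':'] := by
          have := PySem.Chars.neg_one_le_find t ['<','D',':']
          omega
        set i := (PySem.Chars.find t ['<','D',':']).toNat with hi
        have hfi : PySem.Chars.find t ['<','D',':'] = (i : Int) := by omega
        have h1 : ¬ ((i : Int) + 1 = -1) := by omega
        have h2 : ((i : Int) + 1).toNat = i + 1 := by omega
        by_cases hg : PySem.Chars.find (t.drop (i + 3)) ['>'] = -1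
        · simp [hfi, h1, h2, hg]
        · simp [hfi, h1, h2, hg]

-- takeWhile/dropWhile at the first occurrence of a single character = find-based split
lemma split_first (x : Char) (cs : List Char) :
    cs.takeWhile (· != x) =
      (if PySem.Chars.find cs [x] = -1 then cs else cs.take (PySem.Chars.find cs [x]).toNat) ∧
    cs.dropWhile (· != x) =
      (if PySem.Chars.find cs [x] = -1 then [] else cs.drop (PySem.Chars.find cs [x]).toNat) := by
  induction cs with
  | nil =>
    have hf : PySem.Chars.find [] [x] = -1 := by
      rw [PySem.Chars.find_eq_neg_one_iff]
      intro h
      exact absurd (List.eq_nil_of_infix_nil h) (by simp)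
    simp [hf]
  | cons c t ih =>
    by_cases hc : c = x
    · subst hc
      have hf : PySem.Chars.find (c :: t) [c] = 0 := find_zero _ _ (by simp)
      simp [hf]
    · have hp : ¬ ([x] : List Char) <+: (c :: t) := by
        intro h
        obtain ⟨u, hu⟩ := h
        exact hc (by simpa using (congrArg (fun l => l.head?) hu.symm))
      rw [find_cons c t [x] hp]
      by_cases hr : PySem.Chars.find t [x] = -1
      · simp [hr, hc, ih.1, ih.2]
      · have hnn : 0 ≤ PySem.Chars.find t [x] := by
          have := PySem.Chars.neg_one_le_find t [x]
          omega
        set i := (PySem.Chars.find t [x]).toNat with hi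
        have hfi : PySem.Chars.find t [x] = (i : Int) := by omega
        have h1 : ¬ ((i : Int) + 1 = -1) := by omega
        have h2 : ((i : Int) + 1).toNat = i + 1 := by omega
        simp [hc, ih.1, ih.2, hfi, h1, h2]

-- the two legacy prefixes cannot both match (they differ at index 4)
lemma not_both (cs : List Char)
    (h1 : (['h','t','t','p',':','/','/'] : List Char) <+: cs)
    (h2 : (['h','t','t','p','s',':','/','/'] : List Char) <+: cs) : False := by
  obtain ⟨t1, ht1⟩ := h1
  obtain ⟨t2, ht2⟩ := h2
  have h := ht1.trans ht2.symm
  have := congrArg (fun l => l[4]?) h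
  simp at this

-- A's legacy branch body, rewritten as prefix ++ takeWhile / dropWhile
lemma legacy_branch (p cs : List Char) (hpre : p <+: cs) :
    (if PySem.Chars.findFrom cs ['<'] ((p.length : Int)) none = -1 then
       (some cs, ([] : List Char), true)
     else
       (some (PySem.Chars.slice cs none (some (PySem.Chars.findFrom cs ['<'] ((p.length : Int)) none))),
        PySem.Chars.slice cs (some (PySem.Chars.findFrom cs ['<'] ((p.length : Int)) none)) none, true)) =
    (some (p ++ (cs.drop p.length).takeWhile (· != '<')),
     (cs.drop p.length).dropWhile (· != '<'), true) := by
  have hk : p.length ≤ cs.length := hpre.length_le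
  obtain ⟨t1, ht1⟩ := hpre
  rw [PySem.Chars.findFrom_natCast cs ['<'] p.length hk]
  obtain ⟨htake, hdrop⟩ := split_first '<' (cs.drop p.length)
  by_cases hf : PySem.Chars.find (cs.drop p.length) ['<'] = -1
  · have : p ++ cs.drop p.length = cs := by
      rw [← ht1]; simp
    simp [hf, htake, hdrop, this]
  · have hnn : 0 ≤ PySem.Chars.find (cs.drop p.length) ['<'] := by
      have := PySem.Chars.neg_one_le_find (cs.drop p.length) ['<']
      omega
    set j := (PySem.Chars.find (cs.drop p.length) ['<']).toNat with hj
    have hfj : PySem.Chars.find (cs.drop p.length) ['<'] = (j : Int) := by omega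
    have hne : ¬ ((p.length : Int) + (j : Int) = -1) := by omega
    have hcast : (p.length : Int) + (j : Int) = ((p.length + j : Nat) : Int) := by push_cast; ring
    have e1 : PySem.Chars.slice cs none (some ((p.length : Int) + (j : Int))) =
        p ++ (cs.drop p.length).take j := by
      rw [hcast, PySem.Chars.slice_eq_listSlice, PySem.List.slice_to_natCast, List.take_add]
      congr 1
      rw [← ht1]
      simp
    have e2 : PySem.Chars.slice cs (some ((p.length : Int) + (j : Int))) none =
        (cs.drop p.length).drop j := by
      rw [hcast, PySem.Chars.slice_eq_listSlice, PySem.List.slice_from_natCast, List.drop_drop]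
    have htake' : (cs.drop p.length).takeWhile (· != '<') = (cs.drop p.length).take j := by
      rw [htake, if_neg hf]
    have hdrop' : (cs.drop p.length).dropWhile (· != '<') = (cs.drop p.length).drop j := by
      rw [hdrop, if_neg hf]
    have hjne : ¬ ((j : Int) = -1) := by omega
    simp only [hfj, hjne, hne, if_false]
    rw [e1, e2, htake', hdrop']

-- A's legacy for loop = B's single anchored regex match
lemma legacy_eq (cs : List Char) :
    legacyA cs [['h','t','t','p',':','/','/'], ['h','t','t','p','s',':','/','/']] =
      (match legacyMatch cs with
       | some m => (some m.1, m.2, true)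
       | none => (none, cs, false)) := by
  by_cases hs1 : (['h','t','t','p',':','/','/'] : List Char) <+: cs
  · have hb1 : PySem.Chars.startswith cs ['h','t','t','p',':','/','/'] = true :=
      (PySem.Chars.startswith_iff _ _).2 hs1
    have hs2 : ¬ (['h','t','t','p','s',':','/','/'] : List Char) <+: cs :=
      fun h => not_both cs hs1 h
    have hb2 : ¬ (['h','t','t','p','s',':','/','/'] : List Char).isPrefixOf cs = true := by
      rw [List.isPrefixOf_iff_prefix]; exact hs2
    have hb1' : (['h','t','t','p',':','/','/'] : List Char).isPrefixOf cs = true :=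
      List.isPrefixOf_iff_prefix.2 hs1
    rw [legacyA]
    rw [if_pos hb1]
    rw [legacyMatch]
    simp only [hb2, hb1', if_true, if_false, Bool.false_eq_true, Option.map_some]
    exact legacy_branch ['h','t','t','p',':','/','/'] cs hs1
  · have hb1 : ¬ PySem.Chars.startswith cs ['h','t','t','p',':','/','/'] = true := by
      rw [PySem.Chars.startswith_iff]; exact hs1
    have hb1' : ¬ (['h','t','t','p',':','/','/'] : List Char).isPrefixOf cs = true := by
      rw [List.isPrefixOf_iff_prefix]; exact hs1
    by_cases hs2 : (['h','t','t','p','s',':','/','/'] : List Char) <+: cs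
    · have hb2 : PySem.Chars.startswith cs ['h','t','t','p','s',':','/','/'] = true :=
        (PySem.Chars.startswith_iff _ _).2 hs2
      have hb2' : (['h','t','t','p','s',':','/','/'] : List Char).isPrefixOf cs = true :=
        List.isPrefixOf_iff_prefix.2 hs2
      rw [legacyA, if_neg hb1, legacyA, if_pos hb2, legacyMatch]
      simp only [hb2', if_true, Option.map_some]
      exact legacy_branch ['h','t','t','p','s',':','/','/'] cs hs2
    · have hb2 : ¬ PySem.Chars.startswith cs ['h','t','t','p','s',':','/','/'] = true := by
        rw [PySem.Chars.startswith_iff]; exact hs2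
      have hb2' : ¬ (['h','t','t','p','s',':','/','/'] : List Char).isPrefixOf cs = true := by
        rw [List.isPrefixOf_iff_prefix]; exact hs2
      rw [legacyA, if_neg hb1, legacyA, if_neg hb2, legacyA, legacyMatch]
      simp [hb1', hb2']

-- the envelope branch: A's find/slice splice = B's regex search result
lemma core_eq (cs : List Char) : extractA cs = extractB cs := by
  rw [extractA, extractB, searchEnv_spec, legacy_eq]
  by_cases hes : PySem.Chars.find cs ['<','D',':'] = -1
  · simp [hes]
  · have hnn : 0 ≤ PySem.Chars.find cs ['<','D',':'] := by
      have := PySem.Chars.neg_one_le_find cs ['<','D',':']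
      omega
    obtain ⟨h3, _⟩ := PySem.Chars.find_spec hnn
    set i := (PySem.Chars.find cs ['<','D',':']).toNat with hi
    have hfi : PySem.Chars.find cs ['<','D',':'] = (i : Int) := by omega
    have hlen3 : i + 3 ≤ cs.length := by
      have := h3.length_le
      simp at this
      omega
    have hcast : (i : Int) + 3 = ((i + 3 : Nat) : Int) := by push_cast; ring
    have hine : ¬ ((i : Int) = -1) := by omega
    simp only [hfi, hine, ne_eq, not_false_eq_true, if_true, if_false, hcast,
      PySem.Chars.findFrom_natCast cs ['>'] (i + 3) hlen3]
    by_cases hg : PySem.Chars.find (cs.drop (i + 3)) ['>'] = -1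
    · simp [hg]
    · have hgnn : 0 ≤ PySem.Chars.find (cs.drop (i + 3)) ['>'] := by
        have := PySem.Chars.neg_one_le_find (cs.drop (i + 3)) ['>']
        omega
      set j := (PySem.Chars.find (cs.drop (i + 3)) ['>']).toNat with hj
      have hgj : PySem.Chars.find (cs.drop (i + 3)) ['>'] = (j : Int) := by omega
      have hjne : ¬ ((j : Int) = -1) := by omega
      have hne : ¬ (((i + 3 : Nat) : Int) + (j : Int) = -1) := by omega
      simp only [hgj, hjne, hne, if_false, ne_eq, not_false_eq_true, if_true]
      have e1 : PySem.Chars.slice cs (some ((i + 3 : Nat) : Int))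
          (some (((i + 3 : Nat) : Int) + (j : Int))) = (cs.drop (i + 3)).take j := by
        have hc2 : ((i + 3 : Nat) : Int) + (j : Int) = ((i + 3 + j : Nat) : Int) := by
          push_cast; ring
        rw [hc2, PySem.Chars.slice_eq_listSlice, PySem.List.slice_natCast]
        congr 1
        omega
      have e2 : PySem.Chars.slice cs none (some ((i : Nat) : Int)) = cs.take i := by
        rw [PySem.Chars.slice_eq_listSlice, PySem.List.slice_to_natCast]
      have e3 : PySem.Chars.slice cs (some (((i + 3 : Nat) : Int) + (j : Int) + 1)) none =
          (cs.drop (i + 3)).drop (j + 1) := by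
        have hc3 : ((i + 3 : Nat) : Int) + (j : Int) + 1 = ((i + 3 + (j + 1) : Nat) : Int) := by
          push_cast; ring
        rw [hc3, PySem.Chars.slice_eq_listSlice, PySem.List.slice_from_natCast, List.drop_drop]
      rw [e1, e2, e3]

-- ===== VERDICT (by name: the statement is the Claim_ definition above) =====
theorem extract_commitment_url_spec : Claim_equal_extract_commitment_url := by
  intro commitment _
  unfold Spec_extract_commitment_url extract_commitment_url extract_commitment_url_alt
  match commitment with
  | none => rfl
  | some c =>
    by_cases hc : c.toList = []
    · simp [hc, extractB, searchEnv, legacyMatch]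
    · simp only [hc, if_false, core_eq]
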